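-- pv_equiv track=rewrite | github.com/karlkhader/FundProgIS-2024 | clases/clase20/ec2 sol.py | suma_crecientes
-- ===== SOURCE A (Python) =====
-- def suma_crecientes(l: list) -> list:
--     resultado: list = []
--     suma: int = l[0]
--     for i in range(1, len(l)):
--         if l[i] < l[i-1]:
--             resultado.append(suma)
--             suma = l[i]
--         else:
--             suma += l[i]
--
--     resultado.append(suma)
--
--     return resultado
-- ===== SOURCE B (Python) =====
-- def suma_crecientes(l: list) -> list:
--     out = []
--     pos = 0
--     n = len(l)
--     while pos < n:
--         i = pos + 1
--         while i < n and l[i] >= l[i-1]: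
--             i += 1
--         out.append(sum(l[pos:i]))
--         pos = i
--     return out
-- ===== Notes on version B (the rewrite author's own statement) =====
-- stated objective: alternative
-- what changed: B replaces A's single index loop with a running sum and prev-comparison by a run-jumping scheme: an inner scan finds each non-descending run's end, then the slice covering that run is summed and appended.
import Mathlib
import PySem

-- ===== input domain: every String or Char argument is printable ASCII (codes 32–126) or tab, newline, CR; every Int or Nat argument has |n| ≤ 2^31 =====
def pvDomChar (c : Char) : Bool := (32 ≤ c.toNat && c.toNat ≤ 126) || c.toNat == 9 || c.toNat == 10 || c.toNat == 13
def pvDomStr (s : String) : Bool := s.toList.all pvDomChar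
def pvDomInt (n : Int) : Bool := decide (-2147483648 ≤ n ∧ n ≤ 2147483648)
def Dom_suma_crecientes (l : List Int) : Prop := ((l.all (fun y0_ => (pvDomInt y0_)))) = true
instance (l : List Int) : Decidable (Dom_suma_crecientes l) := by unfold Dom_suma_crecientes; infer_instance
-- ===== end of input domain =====

-- B sums each maximal non-descending run by jumping run-to-run (an inner scan finds the run end, then the run slice is summed); same asymptotic cost, different decomposition.

-- ===== PORT A =====
-- suma starts at the first element; the range loop compares each element with its predecessor, flushing or accumulating.
def suma_crecientes (l : List Int) : List Int :=
  let st := (PySem.List.pyRange 1 l.length 1).foldl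
    (fun (st : List Int × Int) i =>
      if PySem.List.pyGetD l i 0 < PySem.List.pyGetD l (i - 1) 0 then
        (st.1 ++ [st.2], PySem.List.pyGetD l i 0)
      else
        (st.1, st.2 + PySem.List.pyGetD l i 0))
    ([], PySem.List.pyGetD l 0 0)
  st.1 ++ [st.2]

-- ===== PORT B =====
-- inner while loop of B: length of the non-descending run continuation after prev
def runLen (prev : Int) : List Int → Nat
  | [] => 0
  | x :: xs => if prev ≤ x then 1 + runLen x xs else 0

lemma runLen_le (prev : Int) (xs : List Int) : runLen prev xs ≤ xs.length := by
  induction xs generalizing prev with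
  | nil => simp [runLen]
  | cons x xs ih =>
    simp only [runLen]
    split
    · have := ih x; simp; omega
    · simp

-- outer while loop of B, over the remaining suffix; the head of the output is the run-slice sum
def suma_crecientes_alt : List Int → List Int
  | [] => []
  | x :: xs =>
      let k := runLen x xs
      ((x :: xs).take (1 + k)).sum :: suma_crecientes_alt (xs.drop k)
termination_by l => l.length
decreasing_by
  have := runLen_le x xs
  simp only [List.length_drop, List.length_cons]; omega

-- ===== PRECONDITION & SPEC =====
-- Pre_ excludes only the empty list, on which A raises IndexError reading the first element.
def Pre_suma_crecientes (l : List Int) : Prop := l ≠ []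
instance (l : List Int) : Decidable (Pre_suma_crecientes l) := by unfold Pre_suma_crecientes; infer_instance
def pvWitness_suma_crecientes : List Int := ([1, 2, 0, 5])

def Spec_suma_crecientes (l : List Int) (out : List Int) : Prop := out = suma_crecientes_alt l
instance (l : List Int) (out : List Int) : Decidable (Spec_suma_crecientes l out) := by unfold Spec_suma_crecientes; infer_instance

-- ===== CLAIM (what is proved, stated in full; the proofs are below) =====
def Claim_equal_suma_crecientes : Prop := ∀ (l : List Int), Dom_suma_crecientes l → Pre_suma_crecientes l → Spec_suma_crecientes l (suma_crecientes l)

-- ===== LEMMAS AND PROOFS =====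

@[simp] lemma alt_nil : suma_crecientes_alt [] = [] := by
  rw [suma_crecientes_alt]

lemma alt_cons (x : Int) (xs : List Int) :
    suma_crecientes_alt (x :: xs)
    = ((x :: xs).take (1 + runLen x xs)).sum :: suma_crecientes_alt (xs.drop (runLen x xs)) := by
  rw [suma_crecientes_alt]

-- A's loop, restructured over the suffix still to be visited (prev = l[i-1])
def loopA (prev : Int) (st : List Int × Int) : List Int → List Int × Int
  | [] => st
  | y :: ys => loopA y (if y < prev then (st.1 ++ [st.2], y) else (st.1, st.2 + y)) ys

lemma getD_mid (pre : List Int) (v : Int) (xs : List Int) :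
    (pre ++ v :: xs).getD pre.length 0 = v := by
  simp [List.getD]

lemma fold_eq_loop (xs : List Int) : ∀ (pre : List Int) (prev : Int) (st : List Int × Int),
    (PySem.List.pyRange ((pre.length : Int) + 1) (pre ++ prev :: xs).length 1).foldl
      (fun (st : List Int × Int) i =>
        if PySem.List.pyGetD (pre ++ prev :: xs) i 0 < PySem.List.pyGetD (pre ++ prev :: xs) (i - 1) 0 then
          (st.1 ++ [st.2], PySem.List.pyGetD (pre ++ prev :: xs) i 0)
        else
          (st.1, st.2 + PySem.List.pyGetD (pre ++ prev :: xs) i 0)) st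
    = loopA prev st xs := by
  induction xs with
  | nil =>
    intro pre prev st
    rw [PySem.List.pyRange_one_eq_nil (by simp)]
    simp [loopA]
  | cons y ys ih =>
    intro pre prev st
    have hlen : ((pre ++ prev :: y :: ys).length : Int) = pre.length + 2 + ys.length := by
      simp; omega
    rw [PySem.List.pyRange_one_cons (by rw [hlen]; omega)]
    have hy : PySem.List.pyGetD (pre ++ prev :: y :: ys) ((pre.length : Int) + 1) 0 = y := by
      have : ((pre.length : Int) + 1) = ((pre ++ [prev]).length : Nat) := by simp
      rw [this, PySem.List.pyGetD_natCast]
      have : pre ++ prev :: y :: ys = (pre ++ [prev]) ++ y :: ys := by simp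
      rw [this, getD_mid]
    have hprev : PySem.List.pyGetD (pre ++ prev :: y :: ys) ((pre.length : Int) + 1 - 1) 0 = prev := by
      have h1 : ((pre.length : Int) + 1 - 1) = ((pre.length : Nat) : Int) := by ring
      rw [h1, PySem.List.pyGetD_natCast, getD_mid]
    rw [List.foldl_cons]
    have hre : pre ++ prev :: y :: ys = (pre ++ [prev]) ++ y :: ys := by simp
    have h2 : ((pre.length : Int) + 1) + 1 = ((pre ++ [prev]).length : Int) + 1 := by simp
    rw [hy, hprev, hre, h2, ih (pre ++ [prev]) y]
    rw [loopA]

lemma loop_eq_alt (xs : List Int) : ∀ (prev : Int) (res : List Int) (suma : Int),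
    (loopA prev (res, suma) xs).1 ++ [(loopA prev (res, suma) xs).2]
    = res ++ (suma + (xs.take (runLen prev xs)).sum) :: suma_crecientes_alt (xs.drop (runLen prev xs)) := by
  induction xs with
  | nil => intro prev res suma; simp [loopA, runLen]
  | cons y ys ih =>
    intro prev res suma
    by_cases h : y < prev
    · have hr : runLen prev (y :: ys) = 0 := by simp [runLen]; omega
      simp only [loopA, if_pos h]
      rw [ih y (res ++ [suma]) y, hr]
      simp only [List.take_zero, List.drop_zero, List.sum_nil, add_zero]
      rw [alt_cons]
      simp [Nat.one_add]
    · have hle : prev ≤ y := by omega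
      have hr : runLen prev (y :: ys) = 1 + runLen y ys := by simp [runLen, hle]
      simp only [loopA, if_neg h]
      rw [ih y res (suma + y), hr]
      simp only [Nat.one_add, List.take_succ_cons, List.drop_succ_cons, List.sum_cons]
      ring_nf

lemma A_eq_B (x : Int) (xs : List Int) :
    suma_crecientes (x :: xs) = suma_crecientes_alt (x :: xs) := by
  have h0 : PySem.List.pyGetD (x :: xs) 0 0 = x := PySem.List.pyGetD_zero_cons x xs 0
  have key := fold_eq_loop xs [] x ([], x)
  simp only [List.nil_append, List.length_nil, Nat.cast_zero, zero_add] at key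
  unfold suma_crecientes
  rw [h0, key, loop_eq_alt xs x [] x]
  rw [alt_cons]
  simp [Nat.one_add]

-- ===== VERDICT (by name: the statement is the Claim_ definition above) =====
theorem suma_crecientes_spec : Claim_equal_suma_crecientes := by
  intro l _ hpre
  unfold Spec_suma_crecientes
  match l with
  | [] => exact absurd rfl hpre
  | x :: xs => exact A_eq_B x xs
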